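-- pv_equiv track=rewrite | github.com/YaoAnthony/ML-Base-Software-Security-Vulnerabilities | util.py | get1stSymPos
-- ===== SOURCE A (Python) =====
-- g_DictSymbols = { '/*': '\n', '*': '\n', '*/': '\n', '//': '\n'}
--
-- def get1stSymPos(s, fromPos=0):
--     listPos = []  # 位置,符号
--     for b in g_DictSymbols:
--         pos = s.find(b, fromPos)
--         listPos.append((pos, b))  # 插入位置以及结束符号 ex: [[5,"//"]]
--     minIndex = -1  # 最小位置在listPos中的索引
--     index = 0  # 索引
--     while index < len(listPos):
--         pos = listPos[index][0]  # 位置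
--         if minIndex < 0 and pos >= 0:  # 第一个非负位置
--             minIndex = index
--         if 0 <= pos < listPos[minIndex][0]:  # 后面出现的更靠前的位置
--             minIndex = index
--         index = index + 1
--     if minIndex == -1:  # 没找到
--         return (-1, None)
--     else:
--         return (listPos[minIndex])
-- ===== SOURCE B (Python) =====
-- SYMS = ('/*', '*', '*/', '//')
--
-- def get1stSymPos(s, fromPos=0):
--     n = len(s)
--     i = fromPos if fromPos >= 0 else max(n + fromPos, 0)
--     while i < n:
--         for sym in SYMS:
--             if s[i:i+len(sym)] == sym:
--                 return (i, sym)
--         i += 1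
--     return (-1, None)
-- ===== Notes on version B (the rewrite author's own statement) =====
-- stated objective: alternative
-- what changed: Replaces A's four separate str.find scans plus a while-loop minimum/tie-break search over the collected (pos,symbol) list by a single left-to-right scan from the effective start offset that returns at the first index where one of the four symbols (checked in dict order) matches.
import Mathlib
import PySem

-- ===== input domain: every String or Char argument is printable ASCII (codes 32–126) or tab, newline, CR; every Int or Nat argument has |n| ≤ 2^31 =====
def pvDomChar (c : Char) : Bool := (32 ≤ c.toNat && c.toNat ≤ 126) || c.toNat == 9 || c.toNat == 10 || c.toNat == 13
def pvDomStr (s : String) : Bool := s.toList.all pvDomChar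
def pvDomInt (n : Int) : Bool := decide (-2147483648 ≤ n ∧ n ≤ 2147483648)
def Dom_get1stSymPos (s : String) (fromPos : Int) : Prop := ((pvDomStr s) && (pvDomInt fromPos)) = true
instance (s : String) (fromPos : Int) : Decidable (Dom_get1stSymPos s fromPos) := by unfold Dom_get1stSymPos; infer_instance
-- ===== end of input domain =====

-- B replaces A's four separate str.find scans plus a min/tie-break search over the collected
-- (pos, symbol) list by a single left-to-right scan that returns at the first matching index.

-- ===== PORT A =====
def g_DictSymbols : PySem.Dict String String :=
  ⟨[("/*", "\n"), ("*", "\n"), ("*/", "\n"), ("//", "\n")]⟩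

-- the 'while index < len(listPos)' loop of A, returning minIndex
def get1stSymPosLoop (listPos : List (Int × String)) (minIndex : Int) (index : Nat) : Int :=
  if h : index < listPos.length then
    let pos := (listPos[index]'h).1
    -- if minIndex < 0 and pos >= 0: minIndex = index
    let m1 := if minIndex < 0 ∧ 0 ≤ pos then (index : Int) else minIndex
    -- if 0 <= pos < listPos[minIndex][0]: minIndex = index   (listPos[minIndex] is only read when
    -- 0 <= pos holds, thanks to Python's short-circuit; pyGet? is then always some — the none
    -- branch is unreachable)
    let m2 := if decide (0 ≤ pos) && (match PySem.List.pyGet? listPos m1 with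
                            | some e => decide (pos < e.1)
                            | none => false) then (index : Int) else m1
    get1stSymPosLoop listPos m2 (index + 1)
  else minIndex
termination_by listPos.length - index

def get1stSymPos (s : String) (fromPos : Int) : Int × Option String :=
  -- for b in g_DictSymbols: listPos.append((s.find(b, fromPos), b))
  let listPos := g_DictSymbols.items.foldl
    (fun acc kv => acc ++ [(PySem.Str.findFrom s kv.1 fromPos, kv.1)]) ([] : List (Int × String))
  let minIndex := get1stSymPosLoop listPos (-1) 0
  if minIndex = -1 then (-1, none)
  else
    match PySem.List.pyGet? listPos minIndex with
    | some e => (e.1, some e.2)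
    | none => (-1, none)   -- unreachable: minIndex ≠ -1 is a valid index into listPos

-- ===== PORT B =====
def pvSyms : List String := ["/*", "*", "*/", "//"]

-- for sym in SYMS: if s[i:i+len(sym)] == sym: return sym
def firstSymAt (s : String) (i : Nat) (syms : List String) : Option String :=
  match syms with
  | [] => none
  | sym :: rest =>
      if PySem.Str.slice s (some (i : Int)) (some ((i : Int) + PySem.Str.len sym)) = sym
      then some sym
      else firstSymAt s i rest

-- while i < n: … ; i += 1
def altScan (s : String) (i : Nat) : Int × Option String :=
  if i < PySem.Str.len s then
    match firstSymAt s i pvSyms with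
    | some sym => ((i : Int), some sym)
    | none => altScan s (i + 1)
  else (-1, none)
termination_by (PySem.Str.len s).toNat - i
decreasing_by simp [PySem.Str.len] at *; omega

def get1stSymPos_alt (s : String) (fromPos : Int) : Int × Option String :=
  let n := PySem.Str.len s
  let start : Nat := if 0 ≤ fromPos then fromPos.toNat else ((n : Int) + fromPos).toNat
  altScan s start

-- ===== PRECONDITION & SPEC =====
def Spec_get1stSymPos (s : String) (fromPos : Int) (out : Int × Option String) : Prop := out = get1stSymPos_alt s fromPos
instance (s : String) (fromPos : Int) (out : Int × Option String) : Decidable (Spec_get1stSymPos s fromPos out) := by unfold Spec_get1stSymPos; infer_instance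

-- ===== CLAIM (what is proved, stated in full; the proofs are below) =====
def Claim_equal_get1stSymPos : Prop := ∀ (s : String) (fromPos : Int), Dom_get1stSymPos s fromPos → Spec_get1stSymPos s fromPos (get1stSymPos s fromPos)

-- ===== LEMMAS AND PROOFS =====

-- A's tie-break minimum, phrased through A's own loop on the 4-element list of positions
def combine4 (p1 p2 p3 p4 : Int) : Int × Option String :=
  let listPos : List (Int × String) := [(p1, "/*"), (p2, "*"), (p3, "*/"), (p4, "//")]
  let m := get1stSymPosLoop listPos (-1) 0
  if m = -1 then (-1, none)
  else
    match PySem.List.pyGet? listPos m with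
    | some e => (e.1, some e.2)
    | none => (-1, none)

theorem A_eq_combine4 (s : String) (fromPos : Int) :
    get1stSymPos s fromPos =
      combine4 (PySem.Str.findFrom s "/*" fromPos) (PySem.Str.findFrom s "*" fromPos)
               (PySem.Str.findFrom s "*/" fromPos) (PySem.Str.findFrom s "//" fromPos) := rfl

-- "p is either -1 (not found) or at least i" / "either -1 or strictly beyond i"
def OkP (i : Nat) (p : Int) : Prop := p = -1 ∨ (i : Int) ≤ p
def GtP (i : Nat) (p : Int) : Prop := p = -1 ∨ (i : Int) < p

set_option maxHeartbeats 1000000 in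
theorem combine4_c1 (i : Nat) (p2 p3 p4 : Int) (h2 : OkP i p2) (h3 : OkP i p3) (h4 : OkP i p4) :
    combine4 (i : Int) p2 p3 p4 = ((i : Int), some "/*") := by
  have n2 : ¬((0:Int) ≤ p2 ∧ p2 < (i:Int)) := by unfold OkP at h2; omega
  have n3 : ¬((0:Int) ≤ p3 ∧ p3 < (i:Int)) := by unfold OkP at h3; omega
  have n4 : ¬((0:Int) ≤ p4 ∧ p4 < (i:Int)) := by unfold OkP at h4; omega
  have hm : get1stSymPosLoop [((i:Int), "/*"), (p2, "*"), (p3, "*/"), (p4, "//")] (-1) 0 = 0 := by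
    repeat (rw [get1stSymPosLoop]; norm_num [PySem.List.pyGet?, PySem.List.pyIdx?, List.getElem_cons_succ, List.getElem_cons_zero, (by decide : Int.toNat 0 = 0), (by decide : Int.toNat 1 = 1), (by decide : Int.toNat 2 = 2), (by decide : Int.toNat 3 = 3), n2, n3, n4])
    all_goals norm_num [List.getElem_cons_succ, List.getElem_cons_zero, (by decide : Int.toNat 0 = 0), (by decide : Int.toNat 1 = 1), (by decide : Int.toNat 2 = 2), (by decide : Int.toNat 3 = 3)]
    all_goals omega
  simp only [combine4, hm]
  norm_num [PySem.List.pyGet?, PySem.List.pyIdx?, List.getElem_cons_succ, List.getElem_cons_zero, (by decide : Int.toNat 0 = 0), (by decide : Int.toNat 1 = 1), (by decide : Int.toNat 2 = 2), (by decide : Int.toNat 3 = 3)]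

set_option maxHeartbeats 1000000 in
theorem combine4_c2 (i : Nat) (p1 p3 p4 : Int) (h1 : GtP i p1) (h3 : OkP i p3) (h4 : OkP i p4) :
    combine4 p1 (i : Int) p3 p4 = ((i : Int), some "*") := by
  have n3 : ¬((0:Int) ≤ p3 ∧ p3 < (i:Int)) := by unfold OkP at h3; omega
  have n4 : ¬((0:Int) ≤ p4 ∧ p4 < (i:Int)) := by unfold OkP at h4; omega
  have hm : get1stSymPosLoop [(p1, "/*"), ((i:Int), "*"), (p3, "*/"), (p4, "//")] (-1) 0 = 1 := by
    rcases h1 with h1|h1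
    · repeat (rw [get1stSymPosLoop]; norm_num [PySem.List.pyGet?, PySem.List.pyIdx?, List.getElem_cons_succ, List.getElem_cons_zero, (by decide : Int.toNat 0 = 0), (by decide : Int.toNat 1 = 1), (by decide : Int.toNat 2 = 2), (by decide : Int.toNat 3 = 3), h1, n3, n4])
      all_goals norm_num [List.getElem_cons_succ, List.getElem_cons_zero, (by decide : Int.toNat 0 = 0), (by decide : Int.toNat 1 = 1), (by decide : Int.toNat 2 = 2), (by decide : Int.toNat 3 = 3)]
      all_goals omega
    · have f1 : (0:Int) ≤ p1 := by omega
      repeat (rw [get1stSymPosLoop]; norm_num [PySem.List.pyGet?, PySem.List.pyIdx?, List.getElem_cons_succ, List.getElem_cons_zero, (by decide : Int.toNat 0 = 0), (by decide : Int.toNat 1 = 1), (by decide : Int.toNat 2 = 2), (by decide : Int.toNat 3 = 3), h1, f1, n3, n4])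
      all_goals norm_num [List.getElem_cons_succ, List.getElem_cons_zero, (by decide : Int.toNat 0 = 0), (by decide : Int.toNat 1 = 1), (by decide : Int.toNat 2 = 2), (by decide : Int.toNat 3 = 3)]
      all_goals omega
  simp only [combine4, hm]
  norm_num [PySem.List.pyGet?, PySem.List.pyIdx?, List.getElem_cons_succ, List.getElem_cons_zero, (by decide : Int.toNat 0 = 0), (by decide : Int.toNat 1 = 1), (by decide : Int.toNat 2 = 2), (by decide : Int.toNat 3 = 3)]

set_option maxHeartbeats 1000000 in
theorem combine4_c3 (i : Nat) (p1 p2 p4 : Int) (h1 : GtP i p1) (h2 : GtP i p2) (h4 : OkP i p4) :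
    combine4 p1 p2 (i : Int) p4 = ((i : Int), some "*/") := by
  have n4 : ¬((0:Int) ≤ p4 ∧ p4 < (i:Int)) := by unfold OkP at h4; omega
  have hm : get1stSymPosLoop [(p1, "/*"), (p2, "*"), ((i:Int), "*/"), (p4, "//")] (-1) 0 = 2 := by
    rcases h1 with h1|h1 <;> rcases h2 with h2|h2
    · repeat (rw [get1stSymPosLoop]; norm_num [PySem.List.pyGet?, PySem.List.pyIdx?, List.getElem_cons_succ, List.getElem_cons_zero, (by decide : Int.toNat 0 = 0), (by decide : Int.toNat 1 = 1), (by decide : Int.toNat 2 = 2), (by decide : Int.toNat 3 = 3), h1, h2, n4])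
      all_goals norm_num [List.getElem_cons_succ, List.getElem_cons_zero, (by decide : Int.toNat 0 = 0), (by decide : Int.toNat 1 = 1), (by decide : Int.toNat 2 = 2), (by decide : Int.toNat 3 = 3)]
      all_goals omega
    · have f2 : (0:Int) ≤ p2 := by omega
      repeat (rw [get1stSymPosLoop]; norm_num [PySem.List.pyGet?, PySem.List.pyIdx?, List.getElem_cons_succ, List.getElem_cons_zero, (by decide : Int.toNat 0 = 0), (by decide : Int.toNat 1 = 1), (by decide : Int.toNat 2 = 2), (by decide : Int.toNat 3 = 3), h1, h2, f2, n4])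
      all_goals norm_num [List.getElem_cons_succ, List.getElem_cons_zero, (by decide : Int.toNat 0 = 0), (by decide : Int.toNat 1 = 1), (by decide : Int.toNat 2 = 2), (by decide : Int.toNat 3 = 3)]
      all_goals omega
    · have f1 : (0:Int) ≤ p1 := by omega
      repeat (rw [get1stSymPosLoop]; norm_num [PySem.List.pyGet?, PySem.List.pyIdx?, List.getElem_cons_succ, List.getElem_cons_zero, (by decide : Int.toNat 0 = 0), (by decide : Int.toNat 1 = 1), (by decide : Int.toNat 2 = 2), (by decide : Int.toNat 3 = 3), h1, h2, f1, n4])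
      all_goals norm_num [List.getElem_cons_succ, List.getElem_cons_zero, (by decide : Int.toNat 0 = 0), (by decide : Int.toNat 1 = 1), (by decide : Int.toNat 2 = 2), (by decide : Int.toNat 3 = 3)]
      all_goals omega
    · have f1 : (0:Int) ≤ p1 := by omega
      have f2 : (0:Int) ≤ p2 := by omega
      rcases lt_or_ge p2 p1 with hq|hq
      · repeat (rw [get1stSymPosLoop]; norm_num [PySem.List.pyGet?, PySem.List.pyIdx?, List.getElem_cons_succ, List.getElem_cons_zero, (by decide : Int.toNat 0 = 0), (by decide : Int.toNat 1 = 1), (by decide : Int.toNat 2 = 2), (by decide : Int.toNat 3 = 3), h1, h2, f1, f2, hq, n4])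
        all_goals norm_num [List.getElem_cons_succ, List.getElem_cons_zero, (by decide : Int.toNat 0 = 0), (by decide : Int.toNat 1 = 1), (by decide : Int.toNat 2 = 2), (by decide : Int.toNat 3 = 3)]
        all_goals omega
      · have hq' : ¬ (p2 < p1) := by omega
        repeat (rw [get1stSymPosLoop]; norm_num [PySem.List.pyGet?, PySem.List.pyIdx?, List.getElem_cons_succ, List.getElem_cons_zero, (by decide : Int.toNat 0 = 0), (by decide : Int.toNat 1 = 1), (by decide : Int.toNat 2 = 2), (by decide : Int.toNat 3 = 3), h1, h2, f1, f2, hq', n4])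
        all_goals norm_num [List.getElem_cons_succ, List.getElem_cons_zero, (by decide : Int.toNat 0 = 0), (by decide : Int.toNat 1 = 1), (by decide : Int.toNat 2 = 2), (by decide : Int.toNat 3 = 3)]
        all_goals omega
  simp only [combine4, hm]
  norm_num [PySem.List.pyGet?, PySem.List.pyIdx?, List.getElem_cons_succ, List.getElem_cons_zero, (by decide : Int.toNat 0 = 0), (by decide : Int.toNat 1 = 1), (by decide : Int.toNat 2 = 2), (by decide : Int.toNat 3 = 3)]

set_option maxHeartbeats 1000000 in
theorem combine4_c4 (i : Nat) (p1 p2 p3 : Int) (h1 : GtP i p1) (h2 : GtP i p2) (h3 : GtP i p3) :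
    combine4 p1 p2 p3 (i : Int) = ((i : Int), some "//") := by
  have hm : get1stSymPosLoop [(p1, "/*"), (p2, "*"), (p3, "*/"), ((i:Int), "//")] (-1) 0 = 3 := by
    rcases h1 with h1|h1 <;> rcases h2 with h2|h2 <;> rcases h3 with h3|h3
    · repeat (rw [get1stSymPosLoop]; norm_num [PySem.List.pyGet?, PySem.List.pyIdx?, List.getElem_cons_succ, List.getElem_cons_zero, (by decide : Int.toNat 0 = 0), (by decide : Int.toNat 1 = 1), (by decide : Int.toNat 2 = 2), (by decide : Int.toNat 3 = 3), h1, h2, h3])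
      all_goals norm_num [List.getElem_cons_succ, List.getElem_cons_zero, (by decide : Int.toNat 0 = 0), (by decide : Int.toNat 1 = 1), (by decide : Int.toNat 2 = 2), (by decide : Int.toNat 3 = 3)]
      all_goals omega
    · have f3 : (0:Int) ≤ p3 := by omega
      repeat (rw [get1stSymPosLoop]; norm_num [PySem.List.pyGet?, PySem.List.pyIdx?, List.getElem_cons_succ, List.getElem_cons_zero, (by decide : Int.toNat 0 = 0), (by decide : Int.toNat 1 = 1), (by decide : Int.toNat 2 = 2), (by decide : Int.toNat 3 = 3), h1, h2, h3, f3])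
      all_goals norm_num [List.getElem_cons_succ, List.getElem_cons_zero, (by decide : Int.toNat 0 = 0), (by decide : Int.toNat 1 = 1), (by decide : Int.toNat 2 = 2), (by decide : Int.toNat 3 = 3)]
      all_goals omega
    · have f2 : (0:Int) ≤ p2 := by omega
      repeat (rw [get1stSymPosLoop]; norm_num [PySem.List.pyGet?, PySem.List.pyIdx?, List.getElem_cons_succ, List.getElem_cons_zero, (by decide : Int.toNat 0 = 0), (by decide : Int.toNat 1 = 1), (by decide : Int.toNat 2 = 2), (by decide : Int.toNat 3 = 3), h1, h2, h3, f2])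
      all_goals norm_num [List.getElem_cons_succ, List.getElem_cons_zero, (by decide : Int.toNat 0 = 0), (by decide : Int.toNat 1 = 1), (by decide : Int.toNat 2 = 2), (by decide : Int.toNat 3 = 3)]
      all_goals omega
    · have f2 : (0:Int) ≤ p2 := by omega
      have f3 : (0:Int) ≤ p3 := by omega
      rcases lt_or_ge p3 p2 with hq|hq
      · repeat (rw [get1stSymPosLoop]; norm_num [PySem.List.pyGet?, PySem.List.pyIdx?, List.getElem_cons_succ, List.getElem_cons_zero, (by decide : Int.toNat 0 = 0), (by decide : Int.toNat 1 = 1), (by decide : Int.toNat 2 = 2), (by decide : Int.toNat 3 = 3), h1, h2, h3, f2, f3, hq])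
        all_goals norm_num [List.getElem_cons_succ, List.getElem_cons_zero, (by decide : Int.toNat 0 = 0), (by decide : Int.toNat 1 = 1), (by decide : Int.toNat 2 = 2), (by decide : Int.toNat 3 = 3)]
        all_goals omega
      · have hq' : ¬ (p3 < p2) := by omega
        repeat (rw [get1stSymPosLoop]; norm_num [PySem.List.pyGet?, PySem.List.pyIdx?, List.getElem_cons_succ, List.getElem_cons_zero, (by decide : Int.toNat 0 = 0), (by decide : Int.toNat 1 = 1), (by decide : Int.toNat 2 = 2), (by decide : Int.toNat 3 = 3), h1, h2, h3, f2, f3, hq'])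
        all_goals norm_num [List.getElem_cons_succ, List.getElem_cons_zero, (by decide : Int.toNat 0 = 0), (by decide : Int.toNat 1 = 1), (by decide : Int.toNat 2 = 2), (by decide : Int.toNat 3 = 3)]
        all_goals omega
    · have f1 : (0:Int) ≤ p1 := by omega
      repeat (rw [get1stSymPosLoop]; norm_num [PySem.List.pyGet?, PySem.List.pyIdx?, List.getElem_cons_succ, List.getElem_cons_zero, (by decide : Int.toNat 0 = 0), (by decide : Int.toNat 1 = 1), (by decide : Int.toNat 2 = 2), (by decide : Int.toNat 3 = 3), h1, h2, h3, f1])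
      all_goals norm_num [List.getElem_cons_succ, List.getElem_cons_zero, (by decide : Int.toNat 0 = 0), (by decide : Int.toNat 1 = 1), (by decide : Int.toNat 2 = 2), (by decide : Int.toNat 3 = 3)]
      all_goals omega
    · have f1 : (0:Int) ≤ p1 := by omega
      have f3 : (0:Int) ≤ p3 := by omega
      rcases lt_or_ge p3 p1 with hq|hq
      · repeat (rw [get1stSymPosLoop]; norm_num [PySem.List.pyGet?, PySem.List.pyIdx?, List.getElem_cons_succ, List.getElem_cons_zero, (by decide : Int.toNat 0 = 0), (by decide : Int.toNat 1 = 1), (by decide : Int.toNat 2 = 2), (by decide : Int.toNat 3 = 3), h1, h2, h3, f1, f3, hq])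
        all_goals norm_num [List.getElem_cons_succ, List.getElem_cons_zero, (by decide : Int.toNat 0 = 0), (by decide : Int.toNat 1 = 1), (by decide : Int.toNat 2 = 2), (by decide : Int.toNat 3 = 3)]
        all_goals omega
      · have hq' : ¬ (p3 < p1) := by omega
        repeat (rw [get1stSymPosLoop]; norm_num [PySem.List.pyGet?, PySem.List.pyIdx?, List.getElem_cons_succ, List.getElem_cons_zero, (by decide : Int.toNat 0 = 0), (by decide : Int.toNat 1 = 1), (by decide : Int.toNat 2 = 2), (by decide : Int.toNat 3 = 3), h1, h2, h3, f1, f3, hq'])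
        all_goals norm_num [List.getElem_cons_succ, List.getElem_cons_zero, (by decide : Int.toNat 0 = 0), (by decide : Int.toNat 1 = 1), (by decide : Int.toNat 2 = 2), (by decide : Int.toNat 3 = 3)]
        all_goals omega
    · have f1 : (0:Int) ≤ p1 := by omega
      have f2 : (0:Int) ≤ p2 := by omega
      rcases lt_or_ge p2 p1 with hq|hq
      · repeat (rw [get1stSymPosLoop]; norm_num [PySem.List.pyGet?, PySem.List.pyIdx?, List.getElem_cons_succ, List.getElem_cons_zero, (by decide : Int.toNat 0 = 0), (by decide : Int.toNat 1 = 1), (by decide : Int.toNat 2 = 2), (by decide : Int.toNat 3 = 3), h1, h2, h3, f1, f2, hq])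
        all_goals norm_num [List.getElem_cons_succ, List.getElem_cons_zero, (by decide : Int.toNat 0 = 0), (by decide : Int.toNat 1 = 1), (by decide : Int.toNat 2 = 2), (by decide : Int.toNat 3 = 3)]
        all_goals omega
      · have hq' : ¬ (p2 < p1) := by omega
        repeat (rw [get1stSymPosLoop]; norm_num [PySem.List.pyGet?, PySem.List.pyIdx?, List.getElem_cons_succ, List.getElem_cons_zero, (by decide : Int.toNat 0 = 0), (by decide : Int.toNat 1 = 1), (by decide : Int.toNat 2 = 2), (by decide : Int.toNat 3 = 3), h1, h2, h3, f1, f2, hq'])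
        all_goals norm_num [List.getElem_cons_succ, List.getElem_cons_zero, (by decide : Int.toNat 0 = 0), (by decide : Int.toNat 1 = 1), (by decide : Int.toNat 2 = 2), (by decide : Int.toNat 3 = 3)]
        all_goals omega
    · have f1 : (0:Int) ≤ p1 := by omega
      have f2 : (0:Int) ≤ p2 := by omega
      have f3 : (0:Int) ≤ p3 := by omega
      rcases lt_or_ge p2 p1 with hq|hq
      · rcases lt_or_ge p3 p2 with hr|hr
        · repeat (rw [get1stSymPosLoop]; norm_num [PySem.List.pyGet?, PySem.List.pyIdx?, List.getElem_cons_succ, List.getElem_cons_zero, (by decide : Int.toNat 0 = 0), (by decide : Int.toNat 1 = 1), (by decide : Int.toNat 2 = 2), (by decide : Int.toNat 3 = 3), h1, h2, h3, f1, f2, f3, hq, hr])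
          all_goals norm_num [List.getElem_cons_succ, List.getElem_cons_zero, (by decide : Int.toNat 0 = 0), (by decide : Int.toNat 1 = 1), (by decide : Int.toNat 2 = 2), (by decide : Int.toNat 3 = 3)]
          all_goals omega
        · have hr' : ¬ (p3 < p2) := by omega
          repeat (rw [get1stSymPosLoop]; norm_num [PySem.List.pyGet?, PySem.List.pyIdx?, List.getElem_cons_succ, List.getElem_cons_zero, (by decide : Int.toNat 0 = 0), (by decide : Int.toNat 1 = 1), (by decide : Int.toNat 2 = 2), (by decide : Int.toNat 3 = 3), h1, h2, h3, f1, f2, f3, hq, hr'])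
          all_goals norm_num [List.getElem_cons_succ, List.getElem_cons_zero, (by decide : Int.toNat 0 = 0), (by decide : Int.toNat 1 = 1), (by decide : Int.toNat 2 = 2), (by decide : Int.toNat 3 = 3)]
          all_goals omega
      · have hq' : ¬ (p2 < p1) := by omega
        rcases lt_or_ge p3 p1 with hr|hr
        · repeat (rw [get1stSymPosLoop]; norm_num [PySem.List.pyGet?, PySem.List.pyIdx?, List.getElem_cons_succ, List.getElem_cons_zero, (by decide : Int.toNat 0 = 0), (by decide : Int.toNat 1 = 1), (by decide : Int.toNat 2 = 2), (by decide : Int.toNat 3 = 3), h1, h2, h3, f1, f2, f3, hq', hr])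
          all_goals norm_num [List.getElem_cons_succ, List.getElem_cons_zero, (by decide : Int.toNat 0 = 0), (by decide : Int.toNat 1 = 1), (by decide : Int.toNat 2 = 2), (by decide : Int.toNat 3 = 3)]
          all_goals omega
        · have hr' : ¬ (p3 < p1) := by omega
          repeat (rw [get1stSymPosLoop]; norm_num [PySem.List.pyGet?, PySem.List.pyIdx?, List.getElem_cons_succ, List.getElem_cons_zero, (by decide : Int.toNat 0 = 0), (by decide : Int.toNat 1 = 1), (by decide : Int.toNat 2 = 2), (by decide : Int.toNat 3 = 3), h1, h2, h3, f1, f2, f3, hq', hr'])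
          all_goals norm_num [List.getElem_cons_succ, List.getElem_cons_zero, (by decide : Int.toNat 0 = 0), (by decide : Int.toNat 1 = 1), (by decide : Int.toNat 2 = 2), (by decide : Int.toNat 3 = 3)]
          all_goals omega
  simp only [combine4, hm]
  norm_num [PySem.List.pyGet?, PySem.List.pyIdx?, List.getElem_cons_succ, List.getElem_cons_zero, (by decide : Int.toNat 0 = 0), (by decide : Int.toNat 1 = 1), (by decide : Int.toNat 2 = 2), (by decide : Int.toNat 3 = 3)]

theorem combine4_none : combine4 (-1) (-1) (-1) (-1) = (-1, none) := by
  have hm : get1stSymPosLoop [(-1, "/*"), (-1, "*"), (-1, "*/"), (-1, "//")] (-1) 0 = -1 := by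
    repeat (rw [get1stSymPosLoop]; norm_num [PySem.List.pyGet?, PySem.List.pyIdx?])
  simp only [combine4, hm]
  norm_num

-- findFrom facts ---------------------------------------------------------

theorem infix_drop_iff (cs b : List Char) (i : Nat) :
    b <:+: cs.drop i ↔ ∃ j, i ≤ j ∧ b <+: cs.drop j := by
  constructor
  · intro h
    obtain ⟨j, hj⟩ := (PySem.Chars.exists_prefix_drop_iff_isIn b (cs.drop i)).2
      ((PySem.Chars.isIn_iff_infix b (cs.drop i)).2 h)
    exact ⟨i + j, by omega, by rwa [List.drop_drop] at hj⟩
  · rintro ⟨j, hij, hpre⟩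
    apply (PySem.Chars.isIn_iff_infix b (cs.drop i)).1
    apply (PySem.Chars.exists_prefix_drop_iff_isIn b (cs.drop i)).1
    exact ⟨j - i, by rw [List.drop_drop]; rwa [Nat.add_sub_cancel' hij]⟩

theorem F_bound (cs b : List Char) (i : Nat) (hi : i ≤ cs.length) :
    PySem.Chars.findFrom cs b (i : Int) = -1 ∨ (i : Int) ≤ PySem.Chars.findFrom cs b (i : Int) := by
  by_cases h : PySem.Chars.findFrom cs b (i : Int) = -1
  · exact Or.inl h
  · exact Or.inr (PySem.Chars.findFrom_natCast_spec cs b i hi h).1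

theorem F_last (cs b : List Char) (hb : b ≠ []) :
    PySem.Chars.findFrom cs b (cs.length : Int) = -1 := by
  rw [PySem.Chars.findFrom_natCast_eq_neg_one_iff cs b cs.length le_rfl]
  rw [List.drop_length, List.infix_nil]
  exact hb

theorem F_step (cs b : List Char) (i : Nat) (hi : i < cs.length) :
    PySem.Chars.findFrom cs b (i : Int) =
      if b <+: cs.drop i then (i : Int) else PySem.Chars.findFrom cs b ((i + 1 : Nat) : Int) := by
  by_cases hp : b <+: cs.drop i
  · rw [if_pos hp]
    have hne : PySem.Chars.findFrom cs b (i : Int) ≠ -1 := by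
      rw [Ne, PySem.Chars.findFrom_natCast_eq_neg_one_iff cs b i hi.le]
      exact not_not_intro hp.isInfix
    obtain ⟨h1, h2, h3⟩ := PySem.Chars.findFrom_natCast_spec cs b i hi.le hne
    by_cases hgt : i < (PySem.Chars.findFrom cs b (i : Int)).toNat
    · exact absurd hp (h3 i le_rfl hgt)
    · omega
  · rw [if_neg hp]
    by_cases h2 : PySem.Chars.findFrom cs b ((i + 1 : Nat) : Int) = -1
    · rw [h2]
      rw [PySem.Chars.findFrom_natCast_eq_neg_one_iff cs b i hi.le]
      rw [PySem.Chars.findFrom_natCast_eq_neg_one_iff cs b (i+1) (by omega)] at h2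
      intro hinf
      obtain ⟨j, hij, hpre⟩ := (infix_drop_iff cs b i).1 hinf
      rcases Nat.eq_or_lt_of_le hij with rfl | hlt
      · exact hp hpre
      · exact h2 ((infix_drop_iff cs b (i+1)).2 ⟨j, hlt, hpre⟩)
    · obtain ⟨g1, g2, g3⟩ := PySem.Chars.findFrom_natCast_spec cs b (i+1) (by omega) h2
      have hne : PySem.Chars.findFrom cs b (i : Int) ≠ -1 := by
        rw [Ne, PySem.Chars.findFrom_natCast_eq_neg_one_iff cs b i hi.le]
        apply not_not_intro
        exact (infix_drop_iff cs b i).2 ⟨(PySem.Chars.findFrom cs b ((i + 1 : Nat) : Int)).toNat, by omega, g2⟩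
      obtain ⟨k1, k2, k3⟩ := PySem.Chars.findFrom_natCast_spec cs b i hi.le hne
      have hvne : (PySem.Chars.findFrom cs b (i : Int)).toNat ≠ i := by
        intro he; rw [he] at k2; exact hp k2
      have hge : i + 1 ≤ (PySem.Chars.findFrom cs b (i : Int)).toNat := by omega
      have l1 : ¬ (PySem.Chars.findFrom cs b (i : Int)).toNat < (PySem.Chars.findFrom cs b ((i+1 : Nat) : Int)).toNat := by
        intro hlt; exact g3 _ hge hlt k2
      have l2 : ¬ (PySem.Chars.findFrom cs b ((i+1 : Nat) : Int)).toNat < (PySem.Chars.findFrom cs b ((i : Nat) : Int)).toNat := by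
        intro hlt; exact k3 _ (by omega) hlt g2
      omega

-- the effective start offset, exactly as Python's find slice bound computes it
def effK (n : Nat) (fromPos : Int) : Nat :=
  if fromPos < 0 then (fromPos + n).toNat else min fromPos.toNat n

theorem F_norm (cs b : List Char) (hb : b ≠ []) (fromPos : Int) :
    PySem.Chars.findFrom cs b fromPos = PySem.Chars.findFrom cs b ((effK cs.length fromPos : Nat) : Int) := by
  rcases lt_or_ge fromPos 0 with hneg | hpos
  · have hk : ((effK cs.length fromPos : Nat) : Int) = if fromPos + cs.length < 0 then 0 else fromPos + cs.length := by
      simp only [effK, if_pos hneg]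
      split_ifs <;> omega
    simp only [PySem.Chars.findFrom]
    rw [hk]
    split_ifs <;> first | rfl | omega
  · rcases le_or_gt fromPos (cs.length : Int) with hle | hgt
    · have : ((effK cs.length fromPos : Nat) : Int) = fromPos := by
        simp only [effK]; split_ifs <;> omega
      rw [this]
    · have hk : effK cs.length fromPos = cs.length := by
        simp only [effK]; split_ifs <;> omega
      rw [hk, F_last cs b hb]
      simp only [PySem.Chars.findFrom]
      split_ifs <;> first | rfl | omega

-- B-side facts -----------------------------------------------------------

theorem slice_take (cs : List Char) (i L : Nat) (hi : i ≤ cs.length) :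
    PySem.List.slice cs (some (i : Int)) (some ((i : Int) + (L : Int))) = (cs.drop i).take L := by
  simp only [PySem.List.slice, PySem.List.clampIdx]
  have h1 : ¬ ((i : Int) < 0) := by omega
  have h2 : ¬ ((i : Int) + (L : Int) < 0) := by omega
  rw [if_neg h1, if_neg h2]
  have e1 : min (Int.toNat (i : Int)) cs.length = i := by omega
  have e2 : (min (Int.toNat ((i : Int) + (L : Int))) cs.length) = min (i + L) cs.length := by omega
  rw [e1, e2]
  have e3 : min (i + L) cs.length - i = min L (cs.length - i) := by omega
  rw [e3, ← List.take_take]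
  congr 1
  rw [← List.length_drop, List.take_length]

theorem match_iff (s : String) (b : String) (i : Nat) (hi : i ≤ s.toList.length) :
    (PySem.Str.slice s (some (i : Int)) (some ((i : Int) + PySem.Str.len b)) = b)
      ↔ b.toList <+: s.toList.drop i := by
  have hlen : PySem.Str.len b = (b.toList.length : Int) := by
    simp [PySem.Str.len]
  have hsl : (PySem.Str.slice s (some (i : Int)) (some ((i : Int) + PySem.Str.len b))).toList
      = (s.toList.drop i).take b.toList.length := by
    rw [PySem.Str.toList_slice, PySem.Chars.slice_eq_listSlice, hlen]
    exact slice_take s.toList i b.toList.length hi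
  constructor
  · intro h
    rw [List.prefix_iff_eq_take, ← hsl, h]
  · intro h
    have : (PySem.Str.slice s (some (i : Int)) (some ((i : Int) + PySem.Str.len b))).toList = b.toList := by
      rw [hsl, ← List.prefix_iff_eq_take.1 h]
    exact String.toList_injective this

theorem strLen_eq (s : String) : PySem.Str.len s = (s.toList.length : Int) := by
  simp [PySem.Str.len]

theorem altScan_stop (s : String) (i : Nat) (hi : s.toList.length ≤ i) :
    altScan s i = (-1, none) := by
  rw [altScan, if_neg (by rw [strLen_eq]; omega)]

theorem okp_ite (i : Nat) (c : Prop) [Decidable c] (x : Int)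
    (hx : x = -1 ∨ ((i + 1 : Nat) : Int) ≤ x) : OkP i (if c then (i : Int) else x) := by
  unfold OkP; split_ifs <;> omega

theorem gtp_of (i : Nat) (x : Int) (hx : x = -1 ∨ ((i + 1 : Nat) : Int) ≤ x) : GtP i x := by
  unfold GtP; omega

set_option maxHeartbeats 1000000 in
theorem scan_eq_aux (s : String) (d : Nat) : ∀ i, i ≤ s.toList.length → s.toList.length - i = d →
    altScan s i =
      combine4 (PySem.Chars.findFrom s.toList "/*".toList (i : Int))
               (PySem.Chars.findFrom s.toList "*".toList (i : Int))
               (PySem.Chars.findFrom s.toList "*/".toList (i : Int))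
               (PySem.Chars.findFrom s.toList "//".toList (i : Int)) := by
  induction d with
  | zero =>
    intro i hi hd
    have hin : i = s.toList.length := by omega
    subst hin
    rw [altScan_stop s _ le_rfl]
    rw [F_last s.toList "/*".toList (by decide), F_last s.toList "*".toList (by decide),
        F_last s.toList "*/".toList (by decide), F_last s.toList "//".toList (by decide)]
    exact combine4_none.symm
  | succ d ih =>
    intro i hi hd
    have hlt : i < s.toList.length := by omega
    have hb1 : (PySem.Str.findFrom s "/*" (i:Int)) = (PySem.Str.findFrom s "/*" (i:Int)) := rfl
    rw [altScan, if_pos (show (i : Int) < PySem.Str.len s by rw [strLen_eq]; omega)]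
    simp only [pvSyms, firstSymAt]
    rw [F_step s.toList "/*".toList i hlt, F_step s.toList "*".toList i hlt,
        F_step s.toList "*/".toList i hlt, F_step s.toList "//".toList i hlt]
    have bnd : ∀ b : List Char,
        PySem.Chars.findFrom s.toList b ((i + 1 : Nat) : Int) = -1 ∨
          ((i + 1 : Nat) : Int) ≤ PySem.Chars.findFrom s.toList b ((i + 1 : Nat) : Int) :=
      fun b => F_bound s.toList b (i+1) (by omega)
    by_cases m1 : "/*".toList <+: s.toList.drop i
    · rw [if_pos ((match_iff s "/*" i hlt.le).2 m1), if_pos m1]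
      exact (combine4_c1 i _ _ _
        (okp_ite i _ _ (bnd _)) (okp_ite i _ _ (bnd _)) (okp_ite i _ _ (bnd _))).symm
    · rw [if_neg (fun h => m1 ((match_iff s "/*" i hlt.le).1 h)), if_neg m1]
      by_cases m2 : "*".toList <+: s.toList.drop i
      · rw [if_pos ((match_iff s "*" i hlt.le).2 m2), if_pos m2]
        exact (combine4_c2 i _ _ _
          (gtp_of i _ (bnd _)) (okp_ite i _ _ (bnd _)) (okp_ite i _ _ (bnd _))).symm
      · rw [if_neg (fun h => m2 ((match_iff s "*" i hlt.le).1 h)), if_neg m2]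
        by_cases m3 : "*/".toList <+: s.toList.drop i
        · rw [if_pos ((match_iff s "*/" i hlt.le).2 m3), if_pos m3]
          exact (combine4_c3 i _ _ _
            (gtp_of i _ (bnd _)) (gtp_of i _ (bnd _)) (okp_ite i _ _ (bnd _))).symm
        · rw [if_neg (fun h => m3 ((match_iff s "*/" i hlt.le).1 h)), if_neg m3]
          by_cases m4 : "//".toList <+: s.toList.drop i
          · rw [if_pos ((match_iff s "//" i hlt.le).2 m4), if_pos m4]
            exact (combine4_c4 i _ _ _
              (gtp_of i _ (bnd _)) (gtp_of i _ (bnd _)) (gtp_of i _ (bnd _))).symm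
          · rw [if_neg (fun h => m4 ((match_iff s "//" i hlt.le).1 h)), if_neg m4]
            exact ih (i+1) (by omega) (by omega)

-- ===== VERDICT (by name: the statement is the Claim_ definition above) =====
theorem get1stSymPos_spec : Claim_equal_get1stSymPos := by
  intro s fromPos _
  unfold Spec_get1stSymPos
  rw [A_eq_combine4]
  simp only [PySem.Str.findFrom_eq]
  rw [F_norm s.toList "/*".toList (by decide) fromPos, F_norm s.toList "*".toList (by decide) fromPos,
      F_norm s.toList "*/".toList (by decide) fromPos, F_norm s.toList "//".toList (by decide) fromPos]
  rw [← scan_eq_aux s (s.toList.length - effK s.toList.length fromPos) (effK s.toList.length fromPos)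
        (by unfold effK; split_ifs <;> omega) rfl]
  unfold get1stSymPos_alt
  simp only []
  rcases lt_or_ge fromPos 0 with hneg | hpos
  · have : (if 0 ≤ fromPos then fromPos.toNat else ((PySem.Str.len s : Int) + fromPos).toNat)
        = effK s.toList.length fromPos := by
      rw [if_neg (by omega)]
      unfold effK
      rw [if_pos hneg, strLen_eq]
      omega
    rw [this]
  · have hs : (if 0 ≤ fromPos then fromPos.toNat else ((PySem.Str.len s : Int) + fromPos).toNat)
        = fromPos.toNat := by rw [if_pos (by omega)]
    rw [hs]
    rcases le_or_gt fromPos.toNat s.toList.length with hle | hgt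
    · have : effK s.toList.length fromPos = fromPos.toNat := by
        unfold effK; rw [if_neg (by omega)]; omega
      rw [this]
    · have hK : effK s.toList.length fromPos = s.toList.length := by
        unfold effK; rw [if_neg (by omega)]; omega
      rw [hK, altScan_stop s _ le_rfl, altScan_stop s _ (by omega)]
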